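-- pv_equiv track=rewrite | github.com/codeWithUtkarsh/aws-mcp-server | src/aws_mcp_server/tools.py | is_pipe_command
-- ===== SOURCE A (Python) =====
-- def is_pipe_command(command: str) -> bool:
--     """Check if a command contains a pipe operator.
--
--     Args:
--         command: The command to check
--
--     Returns:
--         True if the command contains a pipe operator, False otherwise
--     """
--     # Check for pipe operator that's not inside quotes
--     in_single_quote = False
--     in_double_quote = False
--     escaped = False
--
--     for _, char in enumerate(command):
--         # Handle escape sequences
--         if char == "\\" and not escaped:
--             escaped = True
--             continue
--
--         if not escaped:
--             if char == "'" and not in_double_quote: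
--                 in_single_quote = not in_single_quote
--             elif char == '"' and not in_single_quote:
--                 in_double_quote = not in_double_quote
--             elif char == "|" and not in_single_quote and not in_double_quote:
--                 return True
--
--         escaped = False
--
--     return False
-- ===== SOURCE B (Python) =====
-- def is_pipe_command(command: str) -> bool:
--     """Check if a command contains a pipe operator outside quotes."""
--     n = len(command)
--     i = 0
--     while i < n:
--         ch = command[i]
--         if ch == "\\":
--             i += 2  # backslash escapes the next character
--         elif ch in ("'", '"'):
--             # consume the whole quoted region up to the matching quote
--             i += 1
--             while i < n:
--                 if command[i] == "\\":
--                     i += 2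
--                 elif command[i] == ch:
--                     i += 1
--                     break
--                 else:
--                     i += 1
--         elif ch == "|":
--             return True
--         else:
--             i += 1
--     return False
-- ===== Notes on version B (the rewrite author's own statement) =====
-- stated objective: alternative
-- what changed: Replaces A's per-character state-flag scan (in_single_quote/in_double_quote/escaped booleans toggled on every char) with an index-based while loop that consumes each quoted region as a whole unit via an inner matching-quote loop and skips escaped characters by jumping two positions.
import Mathlib
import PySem

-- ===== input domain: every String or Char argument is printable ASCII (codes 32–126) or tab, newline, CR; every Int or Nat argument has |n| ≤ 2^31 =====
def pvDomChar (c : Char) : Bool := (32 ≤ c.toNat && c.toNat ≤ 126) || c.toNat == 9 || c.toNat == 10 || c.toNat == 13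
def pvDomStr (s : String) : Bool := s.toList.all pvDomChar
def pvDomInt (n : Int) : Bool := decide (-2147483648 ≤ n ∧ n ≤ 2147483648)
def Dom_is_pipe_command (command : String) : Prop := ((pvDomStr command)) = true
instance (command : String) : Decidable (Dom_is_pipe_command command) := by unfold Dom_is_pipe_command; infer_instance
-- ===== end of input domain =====

-- B replaces A's per-character boolean-flag scan with an index-advancing scan that
-- consumes each quoted region as a whole unit (objective: alternative decomposition).

-- ===== PORT A =====
-- A's loop over the characters with state (in_single_quote, in_double_quote, escaped).
def pvGoA : List Char → Bool → Bool → Bool → Bool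
  | [], _, _, _ => false
  | c :: cs, sq, dq, esc =>
    if c = '\\' ∧ esc = false then pvGoA cs sq dq true
    else if esc = false then
      if c = '\'' ∧ dq = false then pvGoA cs (!sq) dq false
      else if c = '"' ∧ sq = false then pvGoA cs sq (!dq) false
      else if c = '|' ∧ sq = false ∧ dq = false then true
      else pvGoA cs sq dq false
    else pvGoA cs sq dq false

def is_pipe_command (command : String) : Bool :=
  pvGoA command.toList false false false

-- ===== PORT B =====
-- inner loop: advance past the quoted region, returning the rest after the closing quote q
def pvConsume (q : Char) : List Char → List Char
  | [] => []
  | c :: cs =>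
    if c = '\\' then pvConsume q (cs.drop 1)
    else if c = q then cs
    else pvConsume q cs
termination_by l => l.length
decreasing_by
  · have : (cs.drop 1).length = cs.length - 1 := by simp
    simp only [List.length_cons]; omega
  · simp only [List.length_cons]; omega

-- needed by pvScanB's termination proof
theorem pvConsume_len_aux (q : Char) : ∀ (n : ℕ) (cs : List Char), cs.length ≤ n →
    (pvConsume q cs).length ≤ cs.length := by
  intro n
  induction n with
  | zero =>
      intro cs h
      have : cs = [] := List.eq_nil_of_length_eq_zero (by omega)
      subst this; simp [pvConsume]
  | succ n ih =>
      intro cs h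
      cases cs with
      | nil => simp [pvConsume]
      | cons c cs =>
        simp only [List.length_cons] at h
        by_cases hb : c = '\\'
        · subst hb
          rw [show pvConsume q ('\\' :: cs) = pvConsume q (cs.drop 1) from by
            simp [pvConsume]]
          have h1 := ih (cs.drop 1) (by
            have : (cs.drop 1).length = cs.length - 1 := by simp
            omega)
          have h2 : (cs.drop 1).length = cs.length - 1 := by simp
          simp only [List.length_cons]; omega
        by_cases hq : c = q
        · subst hq
          rw [show pvConsume c (c :: cs) = cs from by simp [pvConsume, hb]]
          simp only [List.length_cons]; omega
        · rw [show pvConsume q (c :: cs) = pvConsume q cs from by simp [pvConsume, hb, hq]]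
          have := ih cs (by omega)
          simp only [List.length_cons]; omega

theorem pvConsume_length (q : Char) (cs : List Char) :
    (pvConsume q cs).length ≤ cs.length :=
  pvConsume_len_aux q cs.length cs le_rfl

-- outer loop of B
def pvScanB : List Char → Bool
  | [] => false
  | c :: cs =>
    if c = '\\' then pvScanB (cs.drop 1)
    else if c = '\'' ∨ c = '"' then pvScanB (pvConsume c cs)
    else if c = '|' then true
    else pvScanB cs
termination_by l => l.length
decreasing_by
  · have : (cs.drop 1).length = cs.length - 1 := by simp
    simp only [List.length_cons]; omega
  · have := pvConsume_length c cs
    simp only [List.length_cons]; omega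
  · simp only [List.length_cons]; omega

def is_pipe_command_alt (command : String) : Bool :=
  pvScanB command.toList

-- ===== PRECONDITION & SPEC =====
def Spec_is_pipe_command (command : String) (out : Bool) : Prop := out = is_pipe_command_alt command
instance (command : String) (out : Bool) : Decidable (Spec_is_pipe_command command out) := by unfold Spec_is_pipe_command; infer_instance

-- ===== CLAIM (what is proved, stated in full; the proofs are below) =====
def Claim_equal_is_pipe_command : Prop := ∀ (command : String), Dom_is_pipe_command command → Spec_is_pipe_command command (is_pipe_command command)

-- ===== LEMMAS AND PROOFS =====

-- escaped state: A skips the next character unconditionally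
theorem pvGoA_escaped (cs : List Char) (sq dq : Bool) :
    pvGoA cs sq dq true = pvGoA (cs.drop 1) sq dq false := by
  cases cs with
  | nil => simp [pvGoA]
  | cons c cs => simp [pvGoA]

-- inside a single-quoted region, A's scan equals scanning the rest after pvConsume
theorem pvGoA_single : ∀ (n : ℕ) (cs : List Char), cs.length ≤ n →
    pvGoA cs true false false = pvGoA (pvConsume '\'' cs) false false false := by
  intro n
  induction n with
  | zero =>
      intro cs h
      have : cs = [] := List.eq_nil_of_length_eq_zero (by omega)
      subst this; simp [pvGoA, pvConsume]
  | succ n ih =>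
      intro cs h
      cases cs with
      | nil => simp [pvGoA, pvConsume]
      | cons c cs =>
        simp only [List.length_cons] at h
        by_cases hb : c = '\\'
        · subst hb
          rw [show pvConsume '\'' ('\\' :: cs) = pvConsume '\'' (cs.drop 1) from by
            simp [pvConsume]]
          rw [show pvGoA ('\\' :: cs) true false false = pvGoA (cs.drop 1) true false false from by
            simp [pvGoA, pvGoA_escaped]]
          exact ih _ (by
            have : (cs.drop 1).length = cs.length - 1 := by simp
            omega)
        by_cases hs : c = '\''
        · subst hs; simp [pvGoA, pvConsume]
        · rw [show pvConsume '\'' (c :: cs) = pvConsume '\'' cs from by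
            simp [pvConsume, hb, hs]]
          rw [show pvGoA (c :: cs) true false false = pvGoA cs true false false from by
            simp [pvGoA, hb, hs]]
          exact ih _ (by omega)

-- inside a double-quoted region, likewise
theorem pvGoA_double : ∀ (n : ℕ) (cs : List Char), cs.length ≤ n →
    pvGoA cs false true false = pvGoA (pvConsume '"' cs) false false false := by
  intro n
  induction n with
  | zero =>
      intro cs h
      have : cs = [] := List.eq_nil_of_length_eq_zero (by omega)
      subst this; simp [pvGoA, pvConsume]
  | succ n ih =>
      intro cs h
      cases cs with
      | nil => simp [pvGoA, pvConsume]
      | cons c cs =>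
        simp only [List.length_cons] at h
        by_cases hb : c = '\\'
        · subst hb
          rw [show pvConsume '"' ('\\' :: cs) = pvConsume '"' (cs.drop 1) from by
            simp [pvConsume]]
          rw [show pvGoA ('\\' :: cs) false true false = pvGoA (cs.drop 1) false true false from by
            simp [pvGoA, pvGoA_escaped]]
          exact ih _ (by
            have : (cs.drop 1).length = cs.length - 1 := by simp
            omega)
        by_cases hd : c = '"'
        · subst hd; simp [pvGoA, pvConsume]
        · rw [show pvConsume '"' (c :: cs) = pvConsume '"' cs from by
            simp [pvConsume, hb, hd]]
          rw [show pvGoA (c :: cs) false true false = pvGoA cs false true false from by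
            simp [pvGoA, hb, hd]]
          exact ih _ (by omega)

-- main: A's flag scan from the neutral state equals B's region-consuming scan
theorem pvGoA_eq_scanB : ∀ (n : ℕ) (cs : List Char), cs.length ≤ n →
    pvGoA cs false false false = pvScanB cs := by
  intro n
  induction n with
  | zero =>
      intro cs h
      have : cs = [] := List.eq_nil_of_length_eq_zero (by omega)
      subst this; simp [pvGoA, pvScanB]
  | succ n ih =>
      intro cs h
      cases cs with
      | nil => simp [pvGoA, pvScanB]
      | cons c cs =>
        simp only [List.length_cons] at h
        by_cases hb : c = '\\'
        · subst hb
          rw [show pvScanB ('\\' :: cs) = pvScanB (cs.drop 1) from by simp [pvScanB]]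
          rw [show pvGoA ('\\' :: cs) false false false = pvGoA (cs.drop 1) false false false from by
            simp [pvGoA, pvGoA_escaped]]
          exact ih _ (by
            have : (cs.drop 1).length = cs.length - 1 := by simp
            omega)
        by_cases hs : c = '\''
        · subst hs
          rw [show pvScanB ('\'' :: cs) = pvScanB (pvConsume '\'' cs) from by simp [pvScanB]]
          rw [show pvGoA ('\'' :: cs) false false false = pvGoA cs true false false from by
            simp [pvGoA]]
          rw [pvGoA_single cs.length cs le_rfl]
          exact ih _ (le_trans (pvConsume_length '\'' cs) (by omega))
        by_cases hd : c = '"'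
        · subst hd
          rw [show pvScanB ('"' :: cs) = pvScanB (pvConsume '"' cs) from by simp [pvScanB]]
          rw [show pvGoA ('"' :: cs) false false false = pvGoA cs false true false from by
            simp [pvGoA]]
          rw [pvGoA_double cs.length cs le_rfl]
          exact ih _ (le_trans (pvConsume_length '"' cs) (by omega))
        by_cases hp : c = '|'
        · subst hp; simp [pvGoA, pvScanB]
        · rw [show pvScanB (c :: cs) = pvScanB cs from by simp [pvScanB, hb, hs, hd, hp]]
          rw [show pvGoA (c :: cs) false false false = pvGoA cs false false false from by
            simp [pvGoA, hb, hs, hd, hp]]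
          exact ih _ (by omega)

-- ===== VERDICT (by name: the statement is the Claim_ definition above) =====
theorem is_pipe_command_spec : Claim_equal_is_pipe_command := by
  intro command _
  unfold Spec_is_pipe_command is_pipe_command is_pipe_command_alt
  exact pvGoA_eq_scanB command.toList.length command.toList le_rfl
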